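-- pv_equiv track=rewrite | github.com/pypi-data/pypi-mirror-390 | packages/blue-platform/blue_platform-1.0-py3-none-any.whl/blue/operators/data_discover_operator.py | _construct_scope
-- ===== SOURCE A (Python) =====
-- def _construct_scope(scope, source, database, collection, concept_type, auto_construct=True):
--     """Construct search scope from attributes based on data registry hierarchy."""
--     if scope is None:
--         # TODO: this might need adjustment after finalizing what does scope mean, exact scope or parent/prefix scope, and whether it's required to construct a scope for None if source/database/collection are provided.
--         return None
--
--     # If auto_construct is False, return the scope as-is
--     if not auto_construct:
--         return scope.rstrip('/') if scope else "/"
--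
--     # If explicit scope is provided and not default, use it as base
--     if scope and scope != "/":
--         base_scope = scope.rstrip('/')
--     else:
--         base_scope = "/"
--         if source:
--             base_scope = f"/source/{source}"
--             if database:
--                 base_scope = f"/source/{source}/database/{database}"
--                 if collection:
--                     base_scope = f"/source/{source}/database/{database}/collection/{collection}"
--
--     # Parse the base scope to extract components
--     scope_parts = base_scope.split('/')
--     scope_components = {'source': None, 'database': None, 'collection': None, 'entity': None, 'relation': None, 'attribute': None}
--
--     # Extract components from scope path
--     for i, part in enumerate(scope_parts):
--         if part == 'source' and i + 1 < len(scope_parts):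
--             scope_components['source'] = scope_parts[i + 1]
--         elif part == 'database' and i + 1 < len(scope_parts):
--             scope_components['database'] = scope_parts[i + 1]
--         elif part == 'collection' and i + 1 < len(scope_parts):
--             scope_components['collection'] = scope_parts[i + 1]
--         elif part == 'entity' and i + 1 < len(scope_parts):
--             scope_components['entity'] = scope_parts[i + 1]
--         elif part == 'relation' and i + 1 < len(scope_parts):
--             scope_components['relation'] = scope_parts[i + 1]
--         elif part == 'attribute' and i + 1 < len(scope_parts):
--             scope_components['attribute'] = scope_parts[i + 1]
--
--     if source:
--         scope_components['source'] = source
--     if database: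
--         scope_components['database'] = database
--     if collection:
--         scope_components['collection'] = collection
--
--     # Construct the appropriate scope based on concept_type
--     if concept_type == 'source':
--         return "/"
--     elif concept_type == 'database':
--         if scope_components['source']:
--             return f"/source/{scope_components['source']}"
--         return "/"
--     elif concept_type == 'collection':
--         if scope_components['source'] and scope_components['database']:
--             return f"/source/{scope_components['source']}/database/{scope_components['database']}"
--         elif scope_components['source']:
--             return f"/source/{scope_components['source']}"
--         return "/"
--     elif concept_type in ['entity', 'relation']:
--         if scope_components['source'] and scope_components['database'] and scope_components['collection']:
--             return f"/source/{scope_components['source']}/database/{scope_components['database']}/collection/{scope_components['collection']}"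
--         elif scope_components['source'] and scope_components['database']:
--             return f"/source/{scope_components['source']}/database/{scope_components['database']}"
--         elif scope_components['source']:
--             return f"/source/{scope_components['source']}"
--         return "/"
--     elif concept_type == 'attribute':
--         if scope_components['source'] and scope_components['database'] and scope_components['collection'] and scope_components['entity']:
--             return f"/source/{scope_components['source']}/database/{scope_components['database']}/collection/{scope_components['collection']}/entity/{scope_components['entity']}"
--         elif scope_components['source'] and scope_components['database'] and scope_components['collection'] and scope_components['relation']:
--             return f"/source/{scope_components['source']}/database/{scope_components['database']}/collection/{scope_components['collection']}/relation/{scope_components['relation']}"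
--         elif scope_components['source'] and scope_components['database'] and scope_components['collection']:
--             return f"/source/{scope_components['source']}/database/{scope_components['database']}/collection/{scope_components['collection']}"
--         elif scope_components['source'] and scope_components['database']:
--             return f"/source/{scope_components['source']}/database/{scope_components['database']}"
--         elif scope_components['source']:
--             return f"/source/{scope_components['source']}"
--         return "/"
--     else:
--         # Fallback to base scope for unknown concept types
--         return base_scope
-- ===== SOURCE B (Python) =====
-- KEYS = ('source', 'database', 'collection', 'entity', 'relation', 'attribute')
--
--
-- def _construct_scope(scope, source, database, collection, concept_type, auto_construct=True):
--     """Construct search scope from attributes based on data registry hierarchy."""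
--     if scope is None:
--         return None
--     if not auto_construct:
--         return scope.rstrip('/') if scope else "/"
--
--     if scope and scope != "/":
--         base_scope = scope.rstrip('/')
--     else:
--         base_scope = "/"
--         if source:
--             base_scope = f"/source/{source}"
--             if database:
--                 base_scope = f"/source/{source}/database/{database}"
--                 if collection:
--                     base_scope = f"/source/{source}/database/{database}/collection/{collection}"
--
--     # Components: last value following each known key among adjacent pairs,
--     # then explicit arguments override.
--     parts = base_scope.split('/')
--     comp = {}
--     for a, b in zip(parts, parts[1:]):
--         if a in KEYS:
--             comp[a] = b
--     if source:
--         comp['source'] = source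
--     if database:
--         comp['database'] = database
--     if collection:
--         comp['collection'] = collection
--
--     # Ordered hierarchy levels per concept type.
--     levels = {'source': [],
--               'database': ['source'],
--               'collection': ['source', 'database'],
--               'entity': ['source', 'database', 'collection'],
--               'relation': ['source', 'database', 'collection'],
--               'attribute': ['source', 'database', 'collection',
--                             'entity' if comp.get('entity') else 'relation']}
--     if concept_type not in levels:
--         return base_scope
--     out = ""
--     for level in levels[concept_type]:
--         value = comp.get(level)
--         if not value:
--             break
--         out += f"/{level}/{value}"
--     return out or "/"
-- ===== Notes on version B (the rewrite author's own statement) =====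
-- stated objective: simpler
-- what changed: B replaces A's six hand-written per-concept-type elif chains of f-strings by a single data-driven pass: a components dict built from adjacent pairs of the split path, a table mapping each concept type to its ordered hierarchy levels, and one greedy loop that appends '/<level>/<value>' until a component is missing.
import Mathlib
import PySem

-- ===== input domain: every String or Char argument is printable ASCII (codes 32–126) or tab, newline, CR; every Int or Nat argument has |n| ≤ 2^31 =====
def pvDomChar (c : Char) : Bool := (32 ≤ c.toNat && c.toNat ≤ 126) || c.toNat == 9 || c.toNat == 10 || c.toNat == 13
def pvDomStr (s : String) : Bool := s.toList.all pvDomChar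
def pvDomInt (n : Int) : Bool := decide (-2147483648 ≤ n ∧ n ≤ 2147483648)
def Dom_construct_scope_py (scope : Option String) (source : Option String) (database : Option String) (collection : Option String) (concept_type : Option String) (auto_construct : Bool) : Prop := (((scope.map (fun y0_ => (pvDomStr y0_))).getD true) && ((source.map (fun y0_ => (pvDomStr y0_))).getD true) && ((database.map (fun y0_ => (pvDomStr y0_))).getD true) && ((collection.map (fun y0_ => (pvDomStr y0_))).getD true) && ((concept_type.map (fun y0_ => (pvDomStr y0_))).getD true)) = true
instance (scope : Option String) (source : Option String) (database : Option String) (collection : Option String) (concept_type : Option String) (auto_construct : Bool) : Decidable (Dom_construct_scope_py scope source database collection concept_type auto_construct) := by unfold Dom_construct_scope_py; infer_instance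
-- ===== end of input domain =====

-- B replaces A's six hand-written per-concept-type elif chains by a parsed component
-- dictionary, a per-concept-type table of hierarchy levels and one greedy path-building
-- loop (objective: simpler).

-- shared helpers: Python truthiness of an Optional[str], its string value,
-- s.rstrip('/') and s.split('/') (both exact, ported by hand over List Char)
def pvTruthy (o : Option String) : Bool := match o with | none => false | some s => s != ""
def pvVal (o : Option String) : String := o.getD ""
-- exact port of Python str.rstrip('/'): remove trailing '/' characters
def pyRstripSlash (s : String) : String := String.mk ((s.toList.reverse.dropWhile (· == '/')).reverse)
-- exact port of Python str.split('/')
def pySplitSlash (s : String) : List String := (PySem.Chars.splitOn s.toList ['/']).map String.mk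
-- the base_scope computation, identical lines in A and in B
def pvBase (sc : String) (source database collection : Option String) : String :=
  if sc != "" && sc != "/" then pyRstripSlash sc
  else if pvTruthy source then
    if pvTruthy database then
      if pvTruthy collection then
        "/source/" ++ pvVal source ++ "/database/" ++ pvVal database ++ "/collection/" ++ pvVal collection
      else "/source/" ++ pvVal source ++ "/database/" ++ pvVal database
    else "/source/" ++ pvVal source
  else "/"

-- ===== PORT A =====
-- A's scope_components dict has six fixed keys: a record
structure CompA where
  src : Option String
  db : Option String
  col : Option String
  ent : Option String
  rel : Option String
  att : Option String
deriving Repr, DecidableEq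

-- A's 'for i, part in enumerate(scope_parts)' with the guarded scope_parts[i+1]
-- lookahead: structural recursion carrying the next element
def parseA : List String → CompA → CompA
  | p :: q :: rest, st =>
    parseA (q :: rest)
      (if p == "source" then { st with src := some q }
       else if p == "database" then { st with db := some q }
       else if p == "collection" then { st with col := some q }
       else if p == "entity" then { st with ent := some q }
       else if p == "relation" then { st with rel := some q }
       else if p == "attribute" then { st with att := some q }
       else st)
  | _, st => st

def finishA (base : String) (source database collection concept_type : Option String) : String :=
  let parts := pySplitSlash base
  let st1 := parseA parts ⟨none, none, none, none, none, none⟩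
  let st2 := if pvTruthy source then { st1 with src := source } else st1
  let st3 := if pvTruthy database then { st2 with db := database } else st2
  let st := if pvTruthy collection then { st3 with col := collection } else st3
  if concept_type == some "source" then "/"
  else if concept_type == some "database" then
    (if pvTruthy st.src then "/source/" ++ pvVal st.src else "/")
  else if concept_type == some "collection" then
    (if pvTruthy st.src && pvTruthy st.db then
        "/source/" ++ pvVal st.src ++ "/database/" ++ pvVal st.db
     else if pvTruthy st.src then "/source/" ++ pvVal st.src
     else "/")
  else if concept_type == some "entity" || concept_type == some "relation" then
    (if pvTruthy st.src && pvTruthy st.db && pvTruthy st.col then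
        "/source/" ++ pvVal st.src ++ "/database/" ++ pvVal st.db ++ "/collection/" ++ pvVal st.col
     else if pvTruthy st.src && pvTruthy st.db then
        "/source/" ++ pvVal st.src ++ "/database/" ++ pvVal st.db
     else if pvTruthy st.src then "/source/" ++ pvVal st.src
     else "/")
  else if concept_type == some "attribute" then
    (if pvTruthy st.src && pvTruthy st.db && pvTruthy st.col && pvTruthy st.ent then
        "/source/" ++ pvVal st.src ++ "/database/" ++ pvVal st.db ++ "/collection/" ++ pvVal st.col ++ "/entity/" ++ pvVal st.ent
     else if pvTruthy st.src && pvTruthy st.db && pvTruthy st.col && pvTruthy st.rel then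
        "/source/" ++ pvVal st.src ++ "/database/" ++ pvVal st.db ++ "/collection/" ++ pvVal st.col ++ "/relation/" ++ pvVal st.rel
     else if pvTruthy st.src && pvTruthy st.db && pvTruthy st.col then
        "/source/" ++ pvVal st.src ++ "/database/" ++ pvVal st.db ++ "/collection/" ++ pvVal st.col
     else if pvTruthy st.src && pvTruthy st.db then
        "/source/" ++ pvVal st.src ++ "/database/" ++ pvVal st.db
     else if pvTruthy st.src then "/source/" ++ pvVal st.src
     else "/")
  else base

def construct_scope_py (scope : Option String) (source : Option String) (database : Option String) (collection : Option String) (concept_type : Option String) (auto_construct : Bool) : Option String :=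
  match scope with
  | none => none
  | some sc =>
    if !auto_construct then some (if sc != "" then pyRstripSlash sc else "/")
    else some (finishA (pvBase sc source database collection) source database collection concept_type)

-- ===== PORT B =====
def pvKeys : List String := ["source", "database", "collection", "entity", "relation", "attribute"]

-- 'for a, b in zip(parts, parts[1:]): if a in KEYS: comp[a] = b'
def parseB (parts : List String) : PySem.Dict String String :=
  (parts.zip parts.tail).foldl
    (fun d pq => if pvKeys.contains pq.1 then d.insert pq.1 pq.2 else d) PySem.Dict.empty

-- 'for level in levels[concept_type]: v = comp.get(level); if not v: break; out += …'
def greedyB : List String → PySem.Dict String String → String → String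
  | [], _, out => out
  | level :: rest, comp, out =>
    match comp.get? level with
    | none => out
    | some v => if v == "" then out else greedyB rest comp (out ++ "/" ++ level ++ "/" ++ v)

def finishB (base : String) (source database collection concept_type : Option String) : String :=
  let parts := pySplitSlash base
  let comp0 := parseB parts
  let comp1 := if pvTruthy source then comp0.insert "source" (pvVal source) else comp0
  let comp2 := if pvTruthy database then comp1.insert "database" (pvVal database) else comp1
  let comp := if pvTruthy collection then comp2.insert "collection" (pvVal collection) else comp2
  let levels : PySem.Dict String (List String) :=
    (((((PySem.Dict.empty.insert "source" []).insert "database" ["source"]).insert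
        "collection" ["source", "database"]).insert
        "entity" ["source", "database", "collection"]).insert
        "relation" ["source", "database", "collection"]).insert
        "attribute" ["source", "database", "collection",
                     if pvTruthy (comp.get? "entity") then "entity" else "relation"]
  match concept_type with
  | none => base
  | some ct =>
    match levels.get? ct with
    | none => base
    | some lvls =>
      let out := greedyB lvls comp ""
      if out != "" then out else "/"

def construct_scope_py_alt (scope : Option String) (source : Option String) (database : Option String) (collection : Option String) (concept_type : Option String) (auto_construct : Bool) : Option String :=
  match scope with
  | none => none
  | some sc =>
    if !auto_construct then some (if sc != "" then pyRstripSlash sc else "/")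
    else some (finishB (pvBase sc source database collection) source database collection concept_type)

-- ===== PRECONDITION & SPEC =====
def Spec_construct_scope_py (scope : Option String) (source : Option String) (database : Option String) (collection : Option String) (concept_type : Option String) (auto_construct : Bool) (out : Option String) : Prop := out = construct_scope_py_alt scope source database collection concept_type auto_construct
instance (scope : Option String) (source : Option String) (database : Option String) (collection : Option String) (concept_type : Option String) (auto_construct : Bool) (out : Option String) : Decidable (Spec_construct_scope_py scope source database collection concept_type auto_construct out) := by unfold Spec_construct_scope_py; infer_instance

-- ===== CLAIM (what is proved, stated in full; the proofs are below) =====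
def Claim_equal_construct_scope_py : Prop := ∀ (scope : Option String) (source : Option String) (database : Option String) (collection : Option String) (concept_type : Option String) (auto_construct : Bool), Dom_construct_scope_py scope source database collection concept_type auto_construct → Spec_construct_scope_py scope source database collection concept_type auto_construct (construct_scope_py scope source database collection concept_type auto_construct)

-- ===== LEMMAS AND PROOFS =====
def InvC (st : CompA) (d : PySem.Dict String String) : Prop :=
  st.src = d.get? "source" ∧ st.db = d.get? "database" ∧ st.col = d.get? "collection" ∧
  st.ent = d.get? "entity" ∧ st.rel = d.get? "relation"

theorem step_inv (st : CompA) (d : PySem.Dict String String) (p q : String) (h : InvC st d) :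
    InvC (if p == "source" then { st with src := some q }
       else if p == "database" then { st with db := some q }
       else if p == "collection" then { st with col := some q }
       else if p == "entity" then { st with ent := some q }
       else if p == "relation" then { st with rel := some q }
       else if p == "attribute" then { st with att := some q }
       else st)
      (if pvKeys.contains p then d.insert p q else d) := by
  obtain ⟨h1, h2, h3, h4, h5⟩ := h
  by_cases hp1 : p = "source"
  · subst hp1; simp [InvC, PySem.Dict.get?_insert, pvKeys, h2, h3, h4, h5]
  · by_cases hp2 : p = "database"
    · subst hp2; simp [InvC, PySem.Dict.get?_insert, pvKeys, h1, h3, h4, h5]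
    · by_cases hp3 : p = "collection"
      · subst hp3; simp [InvC, PySem.Dict.get?_insert, pvKeys, h1, h2, h4, h5]
      · by_cases hp4 : p = "entity"
        · subst hp4; simp [InvC, PySem.Dict.get?_insert, pvKeys, h1, h2, h3, h5]
        · by_cases hp5 : p = "relation"
          · subst hp5; simp [InvC, PySem.Dict.get?_insert, pvKeys, h1, h2, h3, h4]
          · by_cases hp6 : p = "attribute"
            · subst hp6; simp [InvC, PySem.Dict.get?_insert, pvKeys, h1, h2, h3, h4, h5]
            · simp [InvC, pvKeys, hp1, hp2, hp3, hp4, hp5, hp6, h1, h2, h3, h4, h5]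

theorem parse_inv : ∀ (parts : List String) (st : CompA) (d : PySem.Dict String String),
    InvC st d →
    InvC (parseA parts st)
      ((parts.zip parts.tail).foldl
        (fun d pq => if pvKeys.contains pq.1 then d.insert pq.1 pq.2 else d) d)
  | [], st, d, h => by simpa [parseA] using h
  | [p], st, d, h => by simpa [parseA] using h
  | p :: q :: rest, st, d, h => by
    have ih := parse_inv (q :: rest) _ _ (step_inv st d p q h)
    simpa [parseA] using ih

theorem append_ne_empty_left (s t : String) (h : s ≠ "") : s ++ t ≠ "" := by
  intro he
  have h2 : (s ++ t).toList = ([] : List Char) := by rw [he]; rfl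
  rw [String.toList_append] at h2
  rcases List.append_eq_nil_iff.mp h2 with ⟨hs, _⟩
  exact h (by simpa using congrArg String.ofList hs)

theorem pvL1 : ("source" : String) ++ "/" = "source/" := rfl
theorem pvL2 : ("/" : String) ++ "source/" = "/source/" := rfl
theorem pvL3 : ("database" : String) ++ "/" = "database/" := rfl
theorem pvL4 : ("/" : String) ++ "database/" = "/database/" := rfl
theorem pvL5 : ("collection" : String) ++ "/" = "collection/" := rfl
theorem pvL6 : ("/" : String) ++ "collection/" = "/collection/" := rfl
theorem pvL7 : ("entity" : String) ++ "/" = "entity/" := rfl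
theorem pvL8 : ("/" : String) ++ "entity/" = "/entity/" := rfl
theorem pvL9 : ("relation" : String) ++ "/" = "relation/" := rfl
theorem pvL10 : ("/" : String) ++ "relation/" = "/relation/" := rfl

theorem chain_eq (base : String) (st : CompA) (comp : PySem.Dict String String)
    (concept_type : Option String) (h : InvC st comp) :
    (if concept_type == some "source" then "/"
     else if concept_type == some "database" then
       (if pvTruthy st.src then "/source/" ++ pvVal st.src else "/")
     else if concept_type == some "collection" then
       (if pvTruthy st.src && pvTruthy st.db then
           "/source/" ++ pvVal st.src ++ "/database/" ++ pvVal st.db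
        else if pvTruthy st.src then "/source/" ++ pvVal st.src
        else "/")
     else if concept_type == some "entity" || concept_type == some "relation" then
       (if pvTruthy st.src && pvTruthy st.db && pvTruthy st.col then
           "/source/" ++ pvVal st.src ++ "/database/" ++ pvVal st.db ++ "/collection/" ++ pvVal st.col
        else if pvTruthy st.src && pvTruthy st.db then
           "/source/" ++ pvVal st.src ++ "/database/" ++ pvVal st.db
        else if pvTruthy st.src then "/source/" ++ pvVal st.src
        else "/")
     else if concept_type == some "attribute" then
       (if pvTruthy st.src && pvTruthy st.db && pvTruthy st.col && pvTruthy st.ent then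
           "/source/" ++ pvVal st.src ++ "/database/" ++ pvVal st.db ++ "/collection/" ++ pvVal st.col ++ "/entity/" ++ pvVal st.ent
        else if pvTruthy st.src && pvTruthy st.db && pvTruthy st.col && pvTruthy st.rel then
           "/source/" ++ pvVal st.src ++ "/database/" ++ pvVal st.db ++ "/collection/" ++ pvVal st.col ++ "/relation/" ++ pvVal st.rel
        else if pvTruthy st.src && pvTruthy st.db && pvTruthy st.col then
           "/source/" ++ pvVal st.src ++ "/database/" ++ pvVal st.db ++ "/collection/" ++ pvVal st.col
        else if pvTruthy st.src && pvTruthy st.db then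
           "/source/" ++ pvVal st.src ++ "/database/" ++ pvVal st.db
        else if pvTruthy st.src then "/source/" ++ pvVal st.src
        else "/")
     else base)
    =
    (let levels : PySem.Dict String (List String) :=
      (((((PySem.Dict.empty.insert "source" []).insert "database" ["source"]).insert
          "collection" ["source", "database"]).insert
          "entity" ["source", "database", "collection"]).insert
          "relation" ["source", "database", "collection"]).insert
          "attribute" ["source", "database", "collection",
                       if pvTruthy (comp.get? "entity") then "entity" else "relation"]
     match concept_type with
     | none => base
     | some ct =>
       match levels.get? ct with
       | none => base
       | some lvls =>
         let out := greedyB lvls comp ""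
         if out != "" then out else "/") := by
  obtain ⟨h1, h2, h3, h4, h5⟩ := h
  cases concept_type with
  | none => simp
  | some ct =>
    by_cases c1 : ct = "source"
    · subst c1; simp [greedyB, PySem.Dict.get?_insert]
    · by_cases c2 : ct = "database"
      · subst c2
        cases hsrc : st.src with
        | none => simp [greedyB, PySem.Dict.get?_insert, ← h1, hsrc, pvTruthy]
        | some s =>
          by_cases hs : s = "" <;>
            simp [greedyB, PySem.Dict.get?_insert, ← h1, hsrc, hs, pvTruthy, pvVal,
                  append_ne_empty_left, String.append_assoc, pvL1, pvL2, pvL3, pvL4, pvL5, pvL6, pvL7, pvL8, pvL9, pvL10]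
      · by_cases c3 : ct = "collection"
        · subst c3
          cases hsrc : st.src with
          | none => simp [greedyB, PySem.Dict.get?_insert, ← h1, hsrc, pvTruthy]
          | some s =>
            by_cases hs : s = ""
            · simp [greedyB, PySem.Dict.get?_insert, ← h1, hsrc, hs, pvTruthy]
            · cases hdb : st.db with
              | none => simp [greedyB, PySem.Dict.get?_insert, ← h1, ← h2, hsrc, hdb, hs,
                              pvTruthy, pvVal, append_ne_empty_left, String.append_assoc, pvL1, pvL2, pvL3, pvL4, pvL5, pvL6, pvL7, pvL8, pvL9, pvL10]
              | some d =>
                by_cases hd : d = "" <;>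
                  simp [greedyB, PySem.Dict.get?_insert, ← h1, ← h2, hsrc, hdb, hs, hd,
                        pvTruthy, pvVal, append_ne_empty_left, String.append_assoc, pvL1, pvL2, pvL3, pvL4, pvL5, pvL6, pvL7, pvL8, pvL9, pvL10]
        · by_cases c4 : ct = "entity"
          · subst c4
            cases hsrc : st.src with
            | none => simp [greedyB, PySem.Dict.get?_insert, ← h1, hsrc, pvTruthy]
            | some s =>
              by_cases hs : s = ""
              · simp [greedyB, PySem.Dict.get?_insert, ← h1, hsrc, hs, pvTruthy]
              · cases hdb : st.db with
                | none => simp [greedyB, PySem.Dict.get?_insert, ← h1, ← h2, hsrc, hdb, hs,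
                                pvTruthy, pvVal, append_ne_empty_left, String.append_assoc, pvL1, pvL2, pvL3, pvL4, pvL5, pvL6, pvL7, pvL8, pvL9, pvL10]
                | some d =>
                  by_cases hd : d = ""
                  · simp [greedyB, PySem.Dict.get?_insert, ← h1, ← h2, hsrc, hdb, hs, hd,
                          pvTruthy, pvVal, append_ne_empty_left, String.append_assoc, pvL1, pvL2, pvL3, pvL4, pvL5, pvL6, pvL7, pvL8, pvL9, pvL10]
                  · cases hcol : st.col with
                    | none => simp [greedyB, PySem.Dict.get?_insert, ← h1, ← h2, ← h3, hsrc,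
                                    hdb, hcol, hs, hd, pvTruthy, pvVal, append_ne_empty_left, String.append_assoc, pvL1, pvL2, pvL3, pvL4, pvL5, pvL6, pvL7, pvL8, pvL9, pvL10]
                    | some c =>
                      by_cases hc : c = "" <;>
                        simp [greedyB, PySem.Dict.get?_insert, ← h1, ← h2, ← h3, hsrc, hdb,
                              hcol, hs, hd, hc, pvTruthy, pvVal, append_ne_empty_left, String.append_assoc, pvL1, pvL2, pvL3, pvL4, pvL5, pvL6, pvL7, pvL8, pvL9, pvL10]
          · by_cases c5 : ct = "relation"
            · subst c5
              cases hsrc : st.src with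
              | none => simp [greedyB, PySem.Dict.get?_insert, ← h1, hsrc, pvTruthy]
              | some s =>
                by_cases hs : s = ""
                · simp [greedyB, PySem.Dict.get?_insert, ← h1, hsrc, hs, pvTruthy]
                · cases hdb : st.db with
                  | none => simp [greedyB, PySem.Dict.get?_insert, ← h1, ← h2, hsrc, hdb, hs,
                                  pvTruthy, pvVal, append_ne_empty_left, String.append_assoc, pvL1, pvL2, pvL3, pvL4, pvL5, pvL6, pvL7, pvL8, pvL9, pvL10]
                  | some d =>
                    by_cases hd : d = ""
                    · simp [greedyB, PySem.Dict.get?_insert, ← h1, ← h2, hsrc, hdb, hs, hd,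
                            pvTruthy, pvVal, append_ne_empty_left, String.append_assoc, pvL1, pvL2, pvL3, pvL4, pvL5, pvL6, pvL7, pvL8, pvL9, pvL10]
                    · cases hcol : st.col with
                      | none => simp [greedyB, PySem.Dict.get?_insert, ← h1, ← h2, ← h3, hsrc,
                                      hdb, hcol, hs, hd, pvTruthy, pvVal, append_ne_empty_left, String.append_assoc, pvL1, pvL2, pvL3, pvL4, pvL5, pvL6, pvL7, pvL8, pvL9, pvL10]
                      | some c =>
                        by_cases hc : c = "" <;>
                          simp [greedyB, PySem.Dict.get?_insert, ← h1, ← h2, ← h3, hsrc, hdb,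
                                hcol, hs, hd, hc, pvTruthy, pvVal, append_ne_empty_left, String.append_assoc, pvL1, pvL2, pvL3, pvL4, pvL5, pvL6, pvL7, pvL8, pvL9, pvL10]
            · by_cases c6 : ct = "attribute"
              · subst c6
                cases hsrc : st.src with
                | none => simp [greedyB, PySem.Dict.get?_insert, ← h1, ← h4, hsrc, pvTruthy]
                | some s =>
                  by_cases hs : s = ""
                  · simp [greedyB, PySem.Dict.get?_insert, ← h1, ← h4, hsrc, hs, pvTruthy]
                  · cases hdb : st.db with
                    | none => simp [greedyB, PySem.Dict.get?_insert, ← h1, ← h2, ← h4, hsrc,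
                                    hdb, hs, pvTruthy, pvVal, append_ne_empty_left, String.append_assoc, pvL1, pvL2, pvL3, pvL4, pvL5, pvL6, pvL7, pvL8, pvL9, pvL10]
                    | some d =>
                      by_cases hd : d = ""
                      · simp [greedyB, PySem.Dict.get?_insert, ← h1, ← h2, ← h4, hsrc, hdb,
                              hs, hd, pvTruthy, pvVal, append_ne_empty_left, String.append_assoc, pvL1, pvL2, pvL3, pvL4, pvL5, pvL6, pvL7, pvL8, pvL9, pvL10]
                      · cases hcol : st.col with
                        | none => simp [greedyB, PySem.Dict.get?_insert, ← h1, ← h2, ← h3,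
                                        ← h4, hsrc, hdb, hcol, hs, hd, pvTruthy, pvVal,
                                        append_ne_empty_left, String.append_assoc, pvL1, pvL2, pvL3, pvL4, pvL5, pvL6, pvL7, pvL8, pvL9, pvL10]
                        | some c =>
                          by_cases hc : c = ""
                          · simp [greedyB, PySem.Dict.get?_insert, ← h1, ← h2, ← h3, ← h4,
                                  hsrc, hdb, hcol, hs, hd, hc, pvTruthy, pvVal,
                                  append_ne_empty_left, String.append_assoc, pvL1, pvL2, pvL3, pvL4, pvL5, pvL6, pvL7, pvL8, pvL9, pvL10]
                          · cases hent : st.ent with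
                            | some e =>
                              by_cases he : e = ""
                              · cases hrel : st.rel with
                                | none => simp [greedyB, PySem.Dict.get?_insert, ← h1, ← h2,
                                                ← h3, ← h4, ← h5, hsrc, hdb, hcol, hent, hrel,
                                                hs, hd, hc, he, pvTruthy, pvVal,
                                                append_ne_empty_left, String.append_assoc, pvL1, pvL2, pvL3, pvL4, pvL5, pvL6, pvL7, pvL8, pvL9, pvL10]
                                | some r =>
                                  by_cases hr : r = "" <;>
                                    simp [greedyB, PySem.Dict.get?_insert, ← h1, ← h2, ← h3,
                                          ← h4, ← h5, hsrc, hdb, hcol, hent, hrel, hs, hd, hc,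
                                          he, hr, pvTruthy, pvVal, append_ne_empty_left, String.append_assoc, pvL1, pvL2, pvL3, pvL4, pvL5, pvL6, pvL7, pvL8, pvL9, pvL10]
                              · simp [greedyB, PySem.Dict.get?_insert, ← h1, ← h2, ← h3, ← h4,
                                      hsrc, hdb, hcol, hent, hs, hd, hc, he, pvTruthy, pvVal,
                                      append_ne_empty_left, String.append_assoc, pvL1, pvL2, pvL3, pvL4, pvL5, pvL6, pvL7, pvL8, pvL9, pvL10]
                            | none =>
                              cases hrel : st.rel with
                              | none => simp [greedyB, PySem.Dict.get?_insert, ← h1, ← h2,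
                                              ← h3, ← h4, ← h5, hsrc, hdb, hcol, hent, hrel,
                                              hs, hd, hc, pvTruthy, pvVal,
                                              append_ne_empty_left, String.append_assoc, pvL1, pvL2, pvL3, pvL4, pvL5, pvL6, pvL7, pvL8, pvL9, pvL10]
                              | some r =>
                                by_cases hr : r = "" <;>
                                  simp [greedyB, PySem.Dict.get?_insert, ← h1, ← h2, ← h3,
                                        ← h4, ← h5, hsrc, hdb, hcol, hent, hrel, hs, hd, hc,
                                        hr, pvTruthy, pvVal, append_ne_empty_left, String.append_assoc, pvL1, pvL2, pvL3, pvL4, pvL5, pvL6, pvL7, pvL8, pvL9, pvL10]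
              · simp [PySem.Dict.get?_insert, c1, c2, c3, c4, c5, c6]

theorem ov_src (st : CompA) (d : PySem.Dict String String) (source : Option String)
    (h : InvC st d) :
    InvC (if pvTruthy source then { st with src := source } else st)
         (if pvTruthy source then d.insert "source" (pvVal source) else d) := by
  obtain ⟨h1, h2, h3, h4, h5⟩ := h
  cases source with
  | none => simp [pvTruthy, InvC, h1, h2, h3, h4, h5]
  | some s =>
    by_cases hs : s = "" <;>
      simp [pvTruthy, hs, InvC, PySem.Dict.get?_insert, pvVal, h1, h2, h3, h4, h5]

theorem ov_db (st : CompA) (d : PySem.Dict String String) (database : Option String)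
    (h : InvC st d) :
    InvC (if pvTruthy database then { st with db := database } else st)
         (if pvTruthy database then d.insert "database" (pvVal database) else d) := by
  obtain ⟨h1, h2, h3, h4, h5⟩ := h
  cases database with
  | none => simp [pvTruthy, InvC, h1, h2, h3, h4, h5]
  | some s =>
    by_cases hs : s = "" <;>
      simp [pvTruthy, hs, InvC, PySem.Dict.get?_insert, pvVal, h1, h2, h3, h4, h5]

theorem ov_col (st : CompA) (d : PySem.Dict String String) (collection : Option String)
    (h : InvC st d) :
    InvC (if pvTruthy collection then { st with col := collection } else st)
         (if pvTruthy collection then d.insert "collection" (pvVal collection) else d) := by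
  obtain ⟨h1, h2, h3, h4, h5⟩ := h
  cases collection with
  | none => simp [pvTruthy, InvC, h1, h2, h3, h4, h5]
  | some s =>
    by_cases hs : s = "" <;>
      simp [pvTruthy, hs, InvC, PySem.Dict.get?_insert, pvVal, h1, h2, h3, h4, h5]

theorem finish_eq (base : String) (source database collection concept_type : Option String) :
    finishA base source database collection concept_type =
    finishB base source database collection concept_type := by
  have h0 : InvC ⟨none, none, none, none, none, none⟩ PySem.Dict.empty := by
    refine ⟨rfl, rfl, rfl, rfl, rfl⟩
  have hp := parse_inv (pySplitSlash base) _ _ h0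
  have hInv := ov_col _ _ collection (ov_db _ _ database (ov_src _ _ source hp))
  unfold finishA finishB
  exact chain_eq base _ _ concept_type hInv

theorem construct_scope_py_spec : Claim_equal_construct_scope_py := by
  intro scope source database collection concept_type auto_construct _
  unfold Spec_construct_scope_py construct_scope_py construct_scope_py_alt
  cases scope with
  | none => rfl
  | some sc =>
    cases auto_construct with
    | false => rfl
    | true => simp [finish_eq]
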